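-- pv_equiv track=rewrite | github.com/utselmeg/yahtzee | yahtzee.py | gen_all_holds
-- ===== SOURCE A (Python) =====
-- def gen_all_holds(hand):
--     """
--     Generate all possible choices of dice from hand to hold.
--
--     hand: full yahtzee hand
--
--     Returns a set of tuples, where each tuple is dice to hold
--     """
--     def gen_all_hold_recur(hand,_len):
--         """
--         The recursion function to
--         generate all possible choices of dice from hand to hold.
--         hand: full yahzee hand
--         _len: length of list hand
--
--         Returns a set of tuples, where each tuple is dice to hold.
--         """
--         if _len == 0:
--             return set([()])
--         #hand is a list
--         _drop = hand[0]
--         _hand = gen_all_hold_recur(hand[1:],_len-1)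
--         _set = set([()])
--         for _item in _hand:
--             _store = list(_item) #convert tuple to list
--             _store.append(_drop)
--             _set.add(tuple(sorted(_store)))
--             # sorted returns a the same data with different order in the list.
--             # see function sorted https://www.programiz.com/python-programming/methods/built-in/sorted
--             # convert set into tuple, and add tuple into _set. add method only receives hashable, but not iterable
--             # data structure set has a method add, similar with list having a method append.
--         _set.update(_hand)
--         # update method receives iterable
--         return _set
--
--
--     return gen_all_hold_recur(hand,len(hand))
-- ===== SOURCE B (Python) =====
-- def gen_all_holds(hand):
--     """Iterative power-multiset construction: fold each die (right to left)
--     into the running set of holds with set.update, no recursion."""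
--     holds = {()}
--     for die in reversed(hand):
--         new = {()}
--         new.update(tuple(sorted(h + (die,))) for h in holds)
--         new.update(holds)
--         holds = new
--     return holds
-- ===== Notes on version B (the rewrite author's own statement) =====
-- stated objective: idiomatic
-- what changed: Replaces the inner recursive helper and its explicit element-by-element loops (list/append/set.add bookkeeping) with a plain iterative fold: one set.update-based accumulation per die, no recursion and no helper function.
import Mathlib
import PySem

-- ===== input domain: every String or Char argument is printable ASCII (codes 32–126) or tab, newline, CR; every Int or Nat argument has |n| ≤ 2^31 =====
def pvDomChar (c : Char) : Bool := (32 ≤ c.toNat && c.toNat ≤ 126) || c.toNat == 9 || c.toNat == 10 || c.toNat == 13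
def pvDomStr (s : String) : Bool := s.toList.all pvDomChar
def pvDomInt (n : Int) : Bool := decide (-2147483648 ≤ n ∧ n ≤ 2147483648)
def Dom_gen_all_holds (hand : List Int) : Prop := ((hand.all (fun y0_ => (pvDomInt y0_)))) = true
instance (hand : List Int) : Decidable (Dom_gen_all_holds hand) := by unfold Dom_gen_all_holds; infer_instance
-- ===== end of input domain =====

-- B replaces A's recursion and explicit element loops by an iterative fold with set.update
-- (objective: simpler/idiomatic; same asymptotic cost).

-- ===== PORT A =====
-- A's inner gen_all_hold_recur(hand, _len) is always called with _len = len(hand), so the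
-- `_len == 0` test is the empty-list test; ported as structural recursion on the list.
def gen_all_hold_recur : List Int → List (List Int)
  | [] => [[]]
  | d :: rest =>
    let H := gen_all_hold_recur rest
    let S : PySem.Set (List Int) := PySem.Set.ofList [[]]
    let S := H.foldl (fun s item =>
      let store := item ++ [d]
      PySem.Set.add s (PySem.List.sorted store (fun x => x) false)) S
    PySem.Set.update S H

def gen_all_holds (hand : List Int) : List (List Int) :=
  gen_all_hold_recur hand

-- ===== PORT B =====
def gen_all_holds_alt (hand : List Int) : List (List Int) :=
  hand.reverse.foldl (fun holds die =>
    let new : PySem.Set (List Int) := PySem.Set.ofList [[]]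
    let new := PySem.Set.update new
      (holds.map (fun h => PySem.List.sorted (h ++ [die]) (fun x => x) false))
    PySem.Set.update new holds)
    (PySem.Set.ofList [[]])

-- ===== PRECONDITION & SPEC =====
def Spec_gen_all_holds (hand : List Int) (out : List (List Int)) : Prop := out = gen_all_holds_alt hand
instance (hand : List Int) (out : List (List Int)) : Decidable (Spec_gen_all_holds hand out) := by unfold Spec_gen_all_holds; infer_instance

-- ===== CLAIM (what is proved, stated in full; the proofs are below) =====
def Claim_equal_gen_all_holds : Prop := ∀ (hand : List Int), Dom_gen_all_holds hand → Spec_gen_all_holds hand (gen_all_holds hand)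

-- ===== LEMMAS AND PROOFS =====

-- The two combine steps agree: B's set.update over a mapped list is A's add-loop.
theorem step_eq (d : Int) (H : List (List Int)) :
    (PySem.Set.update (PySem.Set.update (PySem.Set.ofList [[]])
        (H.map (fun h => PySem.List.sorted (h ++ [d]) (fun x => x) false))) H)
      = PySem.Set.update
          (H.foldl (fun s item =>
            PySem.Set.add s (PySem.List.sorted (item ++ [d]) (fun x => x) false))
            (PySem.Set.ofList [[]])) H := by
  simp [PySem.Set.update, List.foldl_map]

-- A's recursion is the right fold of the combine step.
theorem recur_eq_foldr (l : List Int) :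
    gen_all_hold_recur l =
      l.foldr (fun d H =>
        PySem.Set.update (PySem.Set.update (PySem.Set.ofList [[]])
          (H.map (fun h => PySem.List.sorted (h ++ [d]) (fun x => x) false))) H)
        [[]] := by
  induction l with
  | nil => rfl
  | cons d rest ih =>
      rw [List.foldr_cons, ← ih, step_eq]
      rfl

-- ===== VERDICT (by name: the statement is the Claim_ definition above) =====
theorem gen_all_holds_spec : Claim_equal_gen_all_holds := by
  intro hand _
  show gen_all_hold_recur hand = gen_all_holds_alt hand
  rw [recur_eq_foldr]
  unfold gen_all_holds_alt
  rw [List.foldl_reverse]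
  rfl
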